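-- pv_equiv track=rewrite | github.com/geishatokyo-lightning/lightning | lightning_core/vg/renumber.py | create_renumbered_table
-- ===== SOURCE A (Python) =====
-- def create_renumbered_table(depth_obj):
--     result = {}
--     renumbered_depth = 1
--     for depth in sorted(depth_obj.keys()):
--         objects = sorted(list(depth_obj[depth]))
--         for obj in objects:
--             result[renumbered_depth] = (depth, obj) # (parent_depth, objectID)
--             renumbered_depth += 1
--     return result
-- ===== SOURCE B (Python) =====
-- def create_renumbered_table(depth_obj):
--     pairs = sorted((d, o) for d, objs in depth_obj.items() for o in objs)
--     return {i: p for i, p in enumerate(pairs, start=1)}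
-- ===== Notes on version B (the rewrite author's own statement) =====
-- stated objective: simpler
-- what changed: One flat lexicographic sort of all (depth, obj) pairs followed by enumerate(..., start=1) replaces the nested per-depth sorts with a hand-maintained counter.
import Mathlib
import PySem

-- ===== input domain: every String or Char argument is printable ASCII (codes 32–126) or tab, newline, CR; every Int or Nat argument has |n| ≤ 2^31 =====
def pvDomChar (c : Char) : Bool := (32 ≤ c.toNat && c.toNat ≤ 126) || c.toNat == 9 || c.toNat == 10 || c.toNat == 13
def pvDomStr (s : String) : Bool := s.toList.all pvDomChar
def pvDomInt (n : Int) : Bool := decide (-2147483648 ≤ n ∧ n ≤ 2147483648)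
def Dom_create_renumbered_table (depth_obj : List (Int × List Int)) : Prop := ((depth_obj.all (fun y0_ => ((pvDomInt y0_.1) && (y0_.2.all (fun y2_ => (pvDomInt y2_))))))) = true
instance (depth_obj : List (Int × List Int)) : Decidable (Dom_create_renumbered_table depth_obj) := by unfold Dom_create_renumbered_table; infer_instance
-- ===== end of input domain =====

-- B replaces A's nested per-depth sorts plus hand-maintained counter by a single
-- lexicographic sort of all (depth, obj) pairs followed by enumerate(..., start=1): simpler.

-- ===== PORT A =====
-- The result dict's keys 1, 2, … are always fresh, so each dict insert appends;
-- the result dict is represented directly as its items list built by appending.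
def create_renumbered_table (depth_obj : List (Int × List Int)) : List (Int × Int × Int) :=
  ((PySem.List.sorted (PySem.Dict.ofList depth_obj).keys (fun x => x) false).foldl
    (fun (st : List (Int × Int × Int) × Int) depth =>
      (PySem.List.sorted ((PySem.Dict.ofList depth_obj).getD depth []) (fun x => x) false).foldl
        (fun st obj => (st.1 ++ [(st.2, depth, obj)], st.2 + 1)) st)
    ([], 1)).1

-- ===== PORT B =====
-- The final dict comprehension's keys 1, 2, … are distinct, so its items list is
-- exactly the enumerate list.
def create_renumbered_table_alt (depth_obj : List (Int × List Int)) : List (Int × Int × Int) :=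
  PySem.List.enumerate
    (PySem.List.sorted2
      ((PySem.Dict.ofList depth_obj).items.flatMap (fun p => p.2.map (fun o => (p.1, o))))
      Prod.fst Prod.snd false) 1

-- ===== PRECONDITION & SPEC =====
def Spec_create_renumbered_table (depth_obj : List (Int × List Int)) (out : List (Int × Int × Int)) : Prop := out = create_renumbered_table_alt depth_obj
instance (depth_obj : List (Int × List Int)) (out : List (Int × Int × Int)) : Decidable (Spec_create_renumbered_table depth_obj out) := by unfold Spec_create_renumbered_table; infer_instance

-- ===== CLAIM (what is proved, stated in full; the proofs are below) =====
def Claim_equal_create_renumbered_table : Prop := ∀ (depth_obj : List (Int × List Int)), Dom_create_renumbered_table depth_obj → Spec_create_renumbered_table depth_obj (create_renumbered_table depth_obj)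

-- ===== LEMMAS AND PROOFS =====

-- The flat pair list in the order A produces it: sorted keys, then sorted objects of each.
def pvFlatA (d : PySem.Dict Int (List Int)) (ks : List Int) : List (Int × Int) :=
  ks.flatMap (fun dep => (PySem.List.sorted (d.getD dep []) (fun x => x) false).map (fun o => (dep, o)))

-- A's inner loop from state (acc, n) appends the enumerated block.
theorem pv_inner (dep : Int) (objs : List Int) :
    ∀ (acc : List (Int × Int × Int)) (n : Int),
    objs.foldl (fun st obj => (st.1 ++ [(st.2, dep, obj)], st.2 + 1)) (acc, n)
      = (acc ++ PySem.List.enumerate (objs.map (fun o => (dep, o))) n, n + objs.length) := by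
  induction objs with
  | nil => intro acc n; simp
  | cons o os ih =>
      intro acc n
      simp only [List.foldl_cons, List.map_cons, PySem.List.enumerate_cons, ih,
        Prod.mk.injEq]
      refine ⟨by simp, by push_cast [List.length_cons]; omega⟩

-- A's outer loop from state (acc, n) appends the enumerated flat list.
theorem pv_outer (d : PySem.Dict Int (List Int)) (ks : List Int) :
    ∀ (acc : List (Int × Int × Int)) (n : Int),
    ks.foldl
      (fun (st : List (Int × Int × Int) × Int) depth =>
        (PySem.List.sorted (d.getD depth []) (fun x => x) false).foldl
          (fun st obj => (st.1 ++ [(st.2, depth, obj)], st.2 + 1)) st)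
      (acc, n)
      = (acc ++ PySem.List.enumerate (pvFlatA d ks) n, n + (pvFlatA d ks).length) := by
  induction ks with
  | nil => intro acc n; simp [pvFlatA]
  | cons k ks ih =>
      intro acc n
      simp only [List.foldl_cons, pv_inner, ih, pvFlatA, List.flatMap_cons,
        PySem.List.enumerate_append, Prod.mk.injEq]
      refine ⟨by simp, by simp; omega⟩

-- sorted2's comparison with keys fst/snd is the strict lexicographic order.
theorem pv_before_eq (a b : Int × Int) :
    (decide (a.1 < b.1) || (!decide (b.1 < a.1) && decide (a.2 < b.2)))
      = decide ((toLex a : Lex (Int × Int)) < toLex b) := by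
  by_cases h1 : a.1 < b.1
  · simp [h1, Prod.Lex.lt_iff]
  · by_cases h2 : b.1 < a.1
    · simp [h1, h2, Prod.Lex.lt_iff]
      omega
    · have he : a.1 = b.1 := le_antisymm (not_lt.1 h2) (not_lt.1 h1)
      by_cases h3 : a.2 < b.2 <;> simp [h3, Prod.Lex.lt_iff, he]

-- insertBy with a strict-linear-order comparison preserves Pairwise (≤ on the key).
theorem pv_insertBy_pairwise {α κ : Type} [LinearOrder κ] (k : α → κ)
    (before : α → α → Bool) (hb : ∀ a b, before a b = decide (k a < k b))
    (x : α) (ys : List α) (h : ys.Pairwise (fun a b => k a ≤ k b)) :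
    (PySem.List.insertBy before x ys).Pairwise (fun a b => k a ≤ k b) := by
  induction ys with
  | nil => simp [PySem.List.insertBy]
  | cons y ys ih =>
      rcases List.pairwise_cons.1 h with ⟨hy, hys⟩
      simp only [PySem.List.insertBy]
      by_cases hxy : before x y = true
      · rw [if_pos hxy]
        have hlt : k x < k y := by have := hb x y; rw [hxy] at this; exact of_decide_eq_true this.symm
        refine List.pairwise_cons.2 ⟨?_, h⟩
        intro z hz
        rcases List.mem_cons.1 hz with rfl | hz
        · exact le_of_lt hlt
        · exact le_trans (le_of_lt hlt) (hy z hz)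
      · rw [if_neg hxy]
        have hle : k y ≤ k x := by
          have := hb x y
          rw [Bool.not_eq_true] at hxy
          rw [hxy] at this
          exact le_of_not_gt (of_decide_eq_false this.symm)
        refine List.pairwise_cons.2 ⟨?_, ih hys⟩
        intro z hz
        rcases (PySem.List.mem_insertBy before x z ys).1 hz with rfl | hz
        · exact hle
        · exact hy z hz
-- The foldl of insertBy (= sorted2) is Pairwise (≤ on the key).
theorem pv_foldl_insertBy_pairwise {α κ : Type} [LinearOrder κ] (k : α → κ)
    (before : α → α → Bool) (hb : ∀ a b, before a b = decide (k a < k b))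
    (xs : List α) :
    ∀ (acc : List α), acc.Pairwise (fun a b => k a ≤ k b) →
      (xs.foldl (fun acc x => PySem.List.insertBy before x acc) acc).Pairwise
        (fun a b => k a ≤ k b) := by
  induction xs with
  | nil => intro acc h; exact h
  | cons x xs ih =>
      intro acc h
      exact ih _ (pv_insertBy_pairwise k before hb x acc h)

theorem pv_sorted2_pairwise (xs : List (Int × Int)) :
    (PySem.List.sorted2 xs Prod.fst Prod.snd false).Pairwise
      (fun a b => (toLex a : Lex (Int × Int)) ≤ toLex b) := by
  unfold PySem.List.sorted2
  simp only [if_neg (by decide : ¬ (false = true))]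
  exact pv_foldl_insertBy_pairwise (fun p => (toLex p : Lex (Int × Int))) _
    (fun a b => pv_before_eq a b) xs [] (by simp)

-- pvFlatA over the sorted keys of a nodup-key dict is Pairwise (lex ≤).
theorem pv_flatA_pairwise (d : PySem.Dict Int (List Int)) (hnd : d.keys.Nodup) :
    (pvFlatA d (PySem.List.sorted d.keys (fun x => x) false)).Pairwise
      (fun a b => (toLex a : Lex (Int × Int)) ≤ toLex b) := by
  have hks : (PySem.List.sorted d.keys (fun x => x) false).Pairwise (· < ·) := by
    have h1 : (PySem.List.sorted d.keys (fun x => x) false).Pairwise (· ≤ ·) :=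
      PySem.List.sorted_pairwise d.keys (fun x => x)
    have h2 : (PySem.List.sorted d.keys (fun x => x) false).Nodup :=
      (PySem.List.sorted_perm d.keys (fun x => x) false).nodup_iff.2 hnd
    exact (h1.and h2).imp (fun {a b} h => lt_of_le_of_ne h.1 h.2)
  rw [pvFlatA, List.pairwise_flatMap]
  constructor
  · intro dep _
    have hs : (PySem.List.sorted (d.getD dep []) (fun x => x) false).Pairwise (· ≤ ·) :=
      PySem.List.sorted_pairwise _ (fun x => x)
    refine hs.map _ ?_
    intro a b hab
    exact Prod.Lex.le_iff.2 (Or.inr ⟨rfl, hab⟩)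
  · refine hks.imp ?_
    intro a b hab x hx y hy
    simp only [List.mem_map] at hx hy
    obtain ⟨_, _, rfl⟩ := hx
    obtain ⟨_, _, rfl⟩ := hy
    exact Prod.Lex.le_iff.2 (Or.inl hab)

-- The two flat lists are permutations of each other.
theorem pv_flat_perm (d : PySem.Dict Int (List Int)) (hnd : d.keys.Nodup) :
    (pvFlatA d (PySem.List.sorted d.keys (fun x => x) false)).Perm
      (d.items.flatMap (fun p => p.2.map (fun o => (p.1, o)))) := by
  have hitems : d.items = d.keys.map (fun k => (k, d.getD k [])) :=
    PySem.Dict.items_eq_map_keys d hnd []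
  rw [hitems, List.flatMap_map]
  unfold pvFlatA
  refine List.Perm.flatMap (PySem.List.sorted_perm d.keys (fun x => x) false) ?_
  intro dep _
  exact (PySem.List.sorted_perm (d.getD dep []) (fun x => x) false).map _

-- Main bridge: B's single sorted2 sort equals A's nested-sort flat list.
theorem pv_sorted2_eq_flatA (depth_obj : List (Int × List Int)) :
    PySem.List.sorted2
        ((PySem.Dict.ofList depth_obj).items.flatMap (fun p => p.2.map (fun o => (p.1, o))))
        Prod.fst Prod.snd false
      = pvFlatA (PySem.Dict.ofList depth_obj)
          (PySem.List.sorted (PySem.Dict.ofList depth_obj).keys (fun x => x) false) := by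
  have hnd : (PySem.Dict.ofList depth_obj).keys.Nodup := PySem.Dict.nodup_keys_ofList depth_obj
  refine PySem.List.eq_of_perm_of_pairwise_le_of_injective
    (fun p => (toLex p : Lex (Int × Int))) toLex.injective
    ?_ (pv_sorted2_pairwise _) (pv_flatA_pairwise _ hnd)
  exact (PySem.List.sorted2_perm _ _ _ false).trans (pv_flat_perm _ hnd).symm

-- ===== VERDICT (by name: the statement is the Claim_ definition above) =====
theorem create_renumbered_table_spec : Claim_equal_create_renumbered_table := by
  intro depth_obj _
  unfold Spec_create_renumbered_table create_renumbered_table create_renumbered_table_alt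
  rw [pv_sorted2_eq_flatA depth_obj]
  rw [pv_outer (PySem.Dict.ofList depth_obj) _ [] 1]
  simp
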